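-- pv_equiv track=rewrite | github.com/danieleschmidt/qnet-no | qnet_no/utils/quantum_encoding.py | distribute_features_across_nodes
-- ===== SOURCE A (Python) =====
-- def distribute_features_across_nodes(n_features: int, n_nodes: int) -> dict:
--     """Distribute features optimally across quantum nodes."""
--     if n_nodes == 0:
--         return {}
--
--     features_per_node = n_features // n_nodes
--     remainder = n_features % n_nodes
--
--     feature_assignments = {}
--     current_feature = 0
--
--     for node_id in range(n_nodes):
--         node_features = features_per_node + (1 if node_id < remainder else 0)
--
--         if node_features > 0:
--             end_feature = current_feature + node_features
--             feature_assignments[node_id] = (current_feature, end_feature)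
--             current_feature = end_feature
--
--     return feature_assignments
-- ===== SOURCE B (Python) =====
-- def distribute_features_across_nodes(n_features: int, n_nodes: int) -> dict:
--     """Distribute features optimally across quantum nodes."""
--     if n_nodes == 0:
--         return {}
--     fpn, rem = divmod(n_features, n_nodes)
--     # each node's range is computed in closed form, independently of other nodes
--     return {
--         node_id: (node_id * fpn + min(node_id, rem),
--                   (node_id + 1) * fpn + min(node_id + 1, rem))
--         for node_id in range(n_nodes)
--         if fpn + (1 if node_id < rem else 0) > 0
--     }
-- ===== Notes on version B (the rewrite author's own statement) =====
-- stated objective: alternative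
-- what changed: B replaces A's running current_feature accumulator with a closed-form computation of each node's (start, end) range, building the dict as a comprehension in which each node is computed independently.
import Mathlib
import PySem

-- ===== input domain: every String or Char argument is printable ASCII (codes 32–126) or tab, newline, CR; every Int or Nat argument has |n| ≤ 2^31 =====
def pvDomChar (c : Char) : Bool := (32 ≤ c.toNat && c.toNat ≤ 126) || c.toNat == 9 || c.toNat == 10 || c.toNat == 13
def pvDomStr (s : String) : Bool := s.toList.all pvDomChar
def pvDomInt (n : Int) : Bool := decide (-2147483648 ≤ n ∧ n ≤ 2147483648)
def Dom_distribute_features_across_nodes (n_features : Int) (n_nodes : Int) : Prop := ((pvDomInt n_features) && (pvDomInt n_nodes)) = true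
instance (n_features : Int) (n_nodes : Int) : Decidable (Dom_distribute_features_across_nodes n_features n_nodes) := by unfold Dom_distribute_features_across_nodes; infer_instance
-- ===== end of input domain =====

-- B computes each node's (start, end) in closed form instead of threading a running offset; same results, same O(n) cost (objective: alternative decomposition).

-- ===== PORT A =====
def distribute_features_across_nodes (n_features : Int) (n_nodes : Int) : List (Int × Int × Int) :=
  if n_nodes = 0 then [] else
  let features_per_node := PySem.Int.floordiv n_features n_nodes
  let remainder := PySem.Int.mod n_features n_nodes
  (((PySem.List.pyRange 0 n_nodes 1).foldl
      (fun (st : PySem.Dict Int (Int × Int) × Int) node_id =>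
        let node_features := features_per_node + (if node_id < remainder then 1 else 0)
        if 0 < node_features then
          let end_feature := st.2 + node_features
          (st.1.insert node_id (st.2, end_feature), end_feature)
        else st)
      (PySem.Dict.empty, 0)).1).items

-- ===== PORT B =====
-- the dict comprehension runs over distinct keys, so its items list is exactly this filterMap
def distribute_features_across_nodes_alt (n_features : Int) (n_nodes : Int) : List (Int × Int × Int) :=
  if n_nodes = 0 then [] else
  let fpn := PySem.Int.floordiv n_features n_nodes
  let rem := PySem.Int.mod n_features n_nodes
  (PySem.List.pyRange 0 n_nodes 1).filterMap (fun node_id =>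
    if 0 < fpn + (if node_id < rem then 1 else 0) then
      some (node_id, (node_id * fpn + min node_id rem,
                      (node_id + 1) * fpn + min (node_id + 1) rem))
    else none)

-- ===== PRECONDITION & SPEC =====
def Spec_distribute_features_across_nodes (n_features : Int) (n_nodes : Int) (out : List (Int × Int × Int)) : Prop := out = distribute_features_across_nodes_alt n_features n_nodes
instance (n_features : Int) (n_nodes : Int) (out : List (Int × Int × Int)) : Decidable (Spec_distribute_features_across_nodes n_features n_nodes out) := by unfold Spec_distribute_features_across_nodes; infer_instance

-- ===== CLAIM (what is proved, stated in full; the proofs are below) =====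
def Claim_equal_distribute_features_across_nodes : Prop := ∀ (n_features : Int) (n_nodes : Int), Dom_distribute_features_across_nodes n_features n_nodes → Spec_distribute_features_across_nodes n_features n_nodes (distribute_features_across_nodes n_features n_nodes)

-- ===== LEMMAS AND PROOFS =====

-- A's one loop step, with the quotient q and remainder r as parameters
def pvStep (q r : Int) (st : PySem.Dict Int (Int × Int) × Int) (node_id : Int) :
    PySem.Dict Int (Int × Int) × Int :=
  let node_features := q + (if node_id < r then 1 else 0)
  if 0 < node_features then
    let end_feature := st.2 + node_features
    (st.1.insert node_id (st.2, end_feature), end_feature)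
  else st

-- B's closed-form per-node entry
def pvEntry (q r : Int) (node_id : Int) : Option (Int × Int × Int) :=
  if 0 < q + (if node_id < r then 1 else 0) then
    some (node_id, (node_id * q + min node_id r, (node_id + 1) * q + min (node_id + 1) r))
  else none

-- the running offset after k iterations, in closed form
def pvOff (q r : Int) (k : Int) : Int := if 0 ≤ q then k * q + min k r else 0

lemma pvEntry_fst {q r i : Int} {p : Int × Int × Int} (h : pvEntry q r i = some p) : p.1 = i := by
  unfold pvEntry at h
  split_ifs at h <;> (injection h with h; subst h; rfl)

lemma pvInv (q r : Int) (hr : 0 ≤ r) (k : Nat) :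
    (((List.range k).map (fun j : Nat => (j : Int))).foldl (pvStep q r) (PySem.Dict.empty, 0)).1.items
      = ((List.range k).map (fun j : Nat => (j : Int))).filterMap (pvEntry q r) ∧
    (((List.range k).map (fun j : Nat => (j : Int))).foldl (pvStep q r) (PySem.Dict.empty, 0)).2
      = pvOff q r (k : Int) := by
  induction k with
  | zero =>
    refine ⟨rfl, ?_⟩
    simp only [List.range_zero, List.map_nil, List.foldl_nil, pvOff, Nat.cast_zero]
    split_ifs with hq
    · rw [zero_mul]; omega
    · rfl
  | succ k ih =>
    obtain ⟨h1, h2⟩ := ih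
    rw [List.range_succ, List.map_append, List.foldl_append, List.filterMap_append]
    simp only [List.map_cons, List.map_nil, List.foldl_cons, List.foldl_nil,
      List.filterMap_cons, List.filterMap_nil]
    have hkey : ∀ p ∈ ((List.range k).map (fun j : Nat => (j : Int))).filterMap (pvEntry q r),
        p.1 ≠ (k : Int) := by
      intro p hp
      rw [List.mem_filterMap] at hp
      obtain ⟨i, hi, he⟩ := hp
      rw [pvEntry_fst he]
      simp only [List.mem_map, List.mem_range] at hi
      obtain ⟨j, hj, rfl⟩ := hi
      exact_mod_cast Nat.ne_of_lt hj
    have hnc : (((List.range k).map (fun j : Nat => (j : Int))).foldl (pvStep q r)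
        (PySem.Dict.empty, 0)).1.contains (k : Int) = false := by
      rw [← Bool.not_eq_true, PySem.Dict.contains_iff_mem_keys]
      intro hmem
      simp only [PySem.Dict.keys, h1, List.mem_map] at hmem
      obtain ⟨p, hp, hpe⟩ := hmem
      exact hkey p hp hpe
    by_cases hc : 0 < q + (if (k : Int) < r then 1 else 0)
    · have hq : 0 ≤ q := by split_ifs at hc <;> omega
      have hmin : min ((k : Int) + 1) r = min (k : Int) r + (if (k : Int) < r then 1 else 0) := by
        split_ifs <;> omega
      have hoff : pvOff q r (k : Int) + (q + (if (k : Int) < r then 1 else 0))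
          = pvOff q r ((k : Int) + 1) := by
        simp only [pvOff, if_pos hq, hmin]; ring
      have hfst : pvOff q r (k : Int) = (k : Int) * q + min (k : Int) r := by
        simp only [pvOff, if_pos hq]
      have hsnd : pvOff q r (k : Int) + (q + (if (k : Int) < r then 1 else 0))
          = ((k : Int) + 1) * q + min ((k : Int) + 1) r := by
        rw [hoff]; simp only [pvOff, if_pos hq]
      simp only [pvStep, pvEntry, if_pos hc]
      refine ⟨?_, ?_⟩
      · rw [PySem.Dict.items_insert_of_not_contains (h := hnc), h1, h2, hsnd, hfst]
        rfl
      · rw [h2]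
        push_cast
        exact hoff
    · have hoff : pvOff q r ((k : Int) + 1) = pvOff q r (k : Int) := by
        simp only [pvOff]
        split_ifs with hq
        · have hq0 : q = 0 := by split_ifs at hc <;> omega
          subst hq0
          have hkr : ¬ ((k : Int) < r) := by
            by_contra h
            rw [if_pos h] at hc
            omega
          simp only [mul_zero]
          omega
        · rfl
      simp only [pvStep, pvEntry, if_neg hc, List.append_nil]
      refine ⟨h1, ?_⟩
      rw [h2]
      push_cast
      rw [hoff]

-- ===== VERDICT (by name: the statement is the Claim_ definition above) =====
theorem distribute_features_across_nodes_spec : Claim_equal_distribute_features_across_nodes := by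
  intro f n _
  unfold Spec_distribute_features_across_nodes distribute_features_across_nodes
    distribute_features_across_nodes_alt
  by_cases h0 : n = 0
  · simp [h0]
  · rw [if_neg h0, if_neg h0]
    show ((PySem.List.pyRange 0 n 1).foldl
        (pvStep (PySem.Int.floordiv f n) (PySem.Int.mod f n)) (PySem.Dict.empty, 0)).1.items
      = (PySem.List.pyRange 0 n 1).filterMap
        (pvEntry (PySem.Int.floordiv f n) (PySem.Int.mod f n))
    by_cases hp : 0 < n
    · have hr : 0 ≤ PySem.Int.mod f n := by
        rw [PySem.Int.mod_eq_emod_of_pos hp]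
        exact Int.emod_nonneg f h0
      have hz : PySem.List.pyRange 0 n 1 = (List.range n.toNat).map (fun j : Nat => (j : Int)) := by
        rw [PySem.List.pyRange_one]
        simp
      rw [hz]
      exact (pvInv (PySem.Int.floordiv f n) (PySem.Int.mod f n) hr n.toNat).1
    · rw [PySem.List.pyRange_one_eq_nil (by omega)]
      rfl
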